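-- pv_equiv track=rewrite | github.com/ssatwik/Bioinformatics-Specialization-Course-Algorithms | Course_2.py | spectral_convolution
-- ===== SOURCE A (Python) =====
-- def spectral_convolution(spectrum):
--     spectrum = sorted(spectrum)
--     convolution = []
--     for i in range(len(spectrum)):
--         for j in range(i):
--             mass_diff = spectrum[i] - spectrum[j]
--             if mass_diff >= 57 and mass_diff <= 200:
--                 convolution.append(mass_diff)
--     return convolution
-- ===== SOURCE B (Python) =====
-- def spectral_convolution(spectrum):
--     # Two-pointer scan over the sorted spectrum: for each i the valid j's
--     # form a contiguous window [lo, hi); both pointers only move forward.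
--     s = sorted(spectrum)
--     n = len(s)
--     convolution = []
--     lo = 0
--     hi = 0
--     for i in range(n):
--         while lo < i and s[i] - s[lo] > 200:
--             lo += 1
--         while hi < i and s[i] - s[hi] >= 57:
--             hi += 1
--         for j in range(lo, hi):
--             convolution.append(s[i] - s[j])
--     return convolution
-- ===== Notes on version B (the rewrite author's own statement) =====
-- stated objective: faster
-- what changed: A's nested O(n^2) scan of all pairs is replaced by a single two-pointer sweep over the sorted spectrum: for each i the valid j's form a contiguous window [lo, hi) and both pointers only move forward, so only the emitted pairs are touched.
import Mathlib
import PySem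

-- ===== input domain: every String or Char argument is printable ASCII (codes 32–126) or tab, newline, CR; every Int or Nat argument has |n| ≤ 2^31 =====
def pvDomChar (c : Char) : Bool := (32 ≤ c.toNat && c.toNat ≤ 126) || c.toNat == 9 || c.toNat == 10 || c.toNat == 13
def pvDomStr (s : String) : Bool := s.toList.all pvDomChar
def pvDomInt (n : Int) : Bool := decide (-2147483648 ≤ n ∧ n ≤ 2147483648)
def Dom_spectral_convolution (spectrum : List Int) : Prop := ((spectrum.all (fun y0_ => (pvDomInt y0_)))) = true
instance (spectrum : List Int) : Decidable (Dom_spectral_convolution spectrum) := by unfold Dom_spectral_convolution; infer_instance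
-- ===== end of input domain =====

-- B replaces A's quadratic nested scan by a two-pointer sweep over the sorted
-- spectrum (the valid j's for each i form a contiguous, monotone window); same return value.

-- ===== PORT A =====
def spectral_convolution (spectrum : List Int) : List Int :=
  let s := PySem.List.sorted spectrum (fun x => x)
  (PySem.List.pyRange 0 (s.length : Int) 1).foldl (fun convolution i =>
    (PySem.List.pyRange 0 i 1).foldl (fun convolution j =>
      let mass_diff := PySem.List.pyGetD s i 0 - PySem.List.pyGetD s j 0
      if 57 ≤ mass_diff ∧ mass_diff ≤ 200 then convolution ++ [mass_diff] else convolution)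
      convolution) []

-- ===== PORT B =====
-- while lo < i and s[i] - s[lo] > 200: lo += 1
def pvAdvLo (s : List Int) (i lo : Nat) : Nat :=
  if _h : lo < i ∧ 200 < s.getD i 0 - s.getD lo 0 then pvAdvLo s i (lo + 1) else lo
termination_by i - lo

-- while hi < i and s[i] - s[hi] >= 57: hi += 1
def pvAdvHi (s : List Int) (i hi : Nat) : Nat :=
  if _h : hi < i ∧ 57 ≤ s.getD i 0 - s.getD hi 0 then pvAdvHi s i (hi + 1) else hi
termination_by i - hi

def spectral_convolution_alt (spectrum : List Int) : List Int :=
  let s := PySem.List.sorted spectrum (fun x => x)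
  let n := s.length
  let res := (List.range n).foldl (fun (st : List Int × Nat × Nat) i =>
    let lo := pvAdvLo s i st.2.1
    let hi := pvAdvHi s i st.2.2
    let convolution := (List.range' lo (hi - lo)).foldl
      (fun c j => c ++ [s.getD i 0 - s.getD j 0]) st.1
    (convolution, lo, hi)) ([], 0, 0)
  res.1

-- ===== PRECONDITION & SPEC =====
def Spec_spectral_convolution (spectrum : List Int) (out : List Int) : Prop := out = spectral_convolution_alt spectrum
instance (spectrum : List Int) (out : List Int) : Decidable (Spec_spectral_convolution spectrum out) := by unfold Spec_spectral_convolution; infer_instance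

-- ===== CLAIM (what is proved, stated in full; the proofs are below) =====
def Claim_equal_spectral_convolution : Prop := ∀ (spectrum : List Int), Dom_spectral_convolution spectrum → Spec_spectral_convolution spectrum (spectral_convolution spectrum)

-- ===== LEMMAS AND PROOFS =====

-- the mass difference s[i] - s[j]
def pvD (s : List Int) (i j : Nat) : Int := s.getD i 0 - s.getD j 0

-- A's fold, normalised to Nat indices and filter/map form
def pvAout (s : List Int) (k : Nat) : List Int :=
  (List.range k).foldl (fun conv i =>
    conv ++ ((List.range i).filter
      (fun j => decide (57 ≤ pvD s i j ∧ pvD s i j ≤ 200))).map (pvD s i)) []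

lemma pv_mono {s : List Int} (hs : List.Pairwise (fun a b : Int => a ≤ b) s)
    {p q : Nat} (hpq : p ≤ q) (hq : q < s.length) : s.getD p 0 ≤ s.getD q 0 := by
  rcases Nat.lt_or_ge p q with h | h
  · rw [List.getD_eq_getElem _ _ (lt_trans h hq), List.getD_eq_getElem _ _ hq]
    exact (List.pairwise_iff_getElem.mp hs) p q (lt_trans h hq) hq h
  · have : p = q := le_antisymm hpq h
    subst this; rfl

lemma pvAdvLo_spec (s : List Int) (i k : Nat) (hk : k ≤ i) :
    k ≤ pvAdvLo s i k ∧ pvAdvLo s i k ≤ i ∧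
    (∀ m, k ≤ m → m < pvAdvLo s i k → 200 < pvD s i m) ∧
    (pvAdvLo s i k < i → pvD s i (pvAdvLo s i k) ≤ 200) := by
  revert hk
  induction k using pvAdvLo.induct (s := s) (i := i) with
  | case1 k h ih =>
    intro _
    rw [pvAdvLo, dif_pos h]
    obtain ⟨h1, h2, h3, h4⟩ := ih h.1
    refine ⟨le_trans (Nat.le_succ k) h1, h2, ?_, h4⟩
    intro m hm1 hm2
    rcases Nat.lt_or_ge m (k+1) with hc | hc
    · have : m = k := by omega
      subst this; exact h.2
    · exact h3 m hc hm2
  | case2 k h =>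
    intro hk
    rw [pvAdvLo, dif_neg h]
    refine ⟨le_refl _, hk, fun m hm1 hm2 => absurd hm1 (by omega), fun hlt => ?_⟩
    push Not at h
    exact h hlt

lemma pvAdvHi_spec (s : List Int) (i k : Nat) (hk : k ≤ i) :
    k ≤ pvAdvHi s i k ∧ pvAdvHi s i k ≤ i ∧
    (∀ m, k ≤ m → m < pvAdvHi s i k → 57 ≤ pvD s i m) ∧
    (pvAdvHi s i k < i → pvD s i (pvAdvHi s i k) < 57) := by
  revert hk
  induction k using pvAdvHi.induct (s := s) (i := i) with
  | case1 k h ih =>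
    intro _
    rw [pvAdvHi, dif_pos h]
    obtain ⟨h1, h2, h3, h4⟩ := ih h.1
    refine ⟨le_trans (Nat.le_succ k) h1, h2, ?_, h4⟩
    intro m hm1 hm2
    rcases Nat.lt_or_ge m (k+1) with hc | hc
    · have : m = k := by omega
      subst this; exact h.2
    · exact h3 m hc hm2
  | case2 k h =>
    intro hk
    rw [pvAdvHi, dif_neg h]
    refine ⟨le_refl _, hk, fun m hm1 hm2 => absurd hm1 (by omega), fun hlt => ?_⟩
    push Not at h
    exact h hlt

-- the filtered index set of A's inner loop is exactly a contiguous window [a, b)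
lemma pv_filter_range_eq_range' (p : Nat → Bool) (k a b : Nat) (hb : b ≤ k)
    (h : ∀ j, j < k → (p j = true ↔ (a ≤ j ∧ j < b))) :
    (List.range k).filter p = List.range' a (b - a) := by
  rcases Nat.lt_or_ge b a with hba | hab
  · rw [Nat.sub_eq_zero_of_le (le_of_lt hba)]
    have hnil : (List.range k).filter p = [] := by
      rw [List.filter_eq_nil_iff]
      intro j hj
      rw [List.mem_range] at hj
      intro hp
      have := (h j hj).mp hp
      omega
    rw [hnil]
    rfl
  · have hsplit : List.range k = List.range' 0 a ++ List.range' a (b - a) ++ List.range' b (k - b) := by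
      rw [List.range_eq_range']
      have e1 : List.range' 0 a ++ List.range' (0 + 1 * a) (b - a) = List.range' 0 (a + (b - a)) := List.range'_append
      have e2 : List.range' 0 (a + (b-a)) ++ List.range' (0 + 1 * (a + (b - a))) (k - b) = List.range' 0 ((a + (b-a)) + (k - b)) := List.range'_append
      simp only [one_mul, zero_add] at e1 e2
      have hab' : a + (b - a) = b := by omega
      rw [hab'] at e1 e2
      have hkk : b + (k - b) = k := by omega
      rw [hkk] at e2
      rw [← e2, ← e1]
    rw [hsplit, List.filter_append, List.filter_append]
    have f1 : (List.range' 0 a).filter p = [] := by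
      rw [List.filter_eq_nil_iff]
      intro j hj
      rw [List.mem_range'_1] at hj
      intro hp
      have := (h j (by omega)).mp hp
      omega
    have f2 : (List.range' a (b - a)).filter p = List.range' a (b - a) := by
      rw [List.filter_eq_self]
      intro j hj
      rw [List.mem_range'_1] at hj
      exact (h j (by omega)).mpr (by omega)
    have f3 : (List.range' b (k - b)).filter p = [] := by
      rw [List.filter_eq_nil_iff]
      intro j hj
      rw [List.mem_range'_1] at hj
      intro hp
      have := (h j (by omega)).mp hp
      omega
    rw [f1, f2, f3]
    simp

-- main invariant of B's outer loop: the accumulator is A's output so far, and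
-- every index below each pointer is already out of (resp. inside) the window for the next i
lemma pv_main (s : List Int) (hs : List.Pairwise (fun a b : Int => a ≤ b) s)
    (k : Nat) (hk : k ≤ s.length) :
    ∃ lo hi, (List.range k).foldl (fun (st : List Int × Nat × Nat) i =>
        let lo := pvAdvLo s i st.2.1
        let hi := pvAdvHi s i st.2.2
        let convolution := (List.range' lo (hi - lo)).foldl
          (fun c j => c ++ [s.getD i 0 - s.getD j 0]) st.1
        (convolution, lo, hi)) ([], 0, 0) = (pvAout s k, lo, hi) ∧
      lo ≤ k ∧ hi ≤ k ∧
      (k < s.length → (∀ m, m < lo → 200 < pvD s k m) ∧ (∀ m, m < hi → 57 ≤ pvD s k m)) := by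
  induction k with
  | zero =>
    refine ⟨0, 0, ?_, le_refl _, le_refl _, fun _ => ⟨fun m hm => absurd hm (by omega), fun m hm => absurd hm (by omega)⟩⟩
    simp [pvAout]
  | succ k ih =>
    have hk' : k ≤ s.length := by omega
    have hkn : k < s.length := by omega
    obtain ⟨lo, hi, hfold, hlo, hhi, hinv⟩ := ih hk'
    obtain ⟨hinvLo, hinvHi⟩ := hinv hkn
    obtain ⟨l1, l2, l3, l4⟩ := pvAdvLo_spec s k lo hlo
    obtain ⟨m1, m2, m3, m4⟩ := pvAdvHi_spec s k hi hhi
    set lo' := pvAdvLo s k lo with hlo'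
    set hi' := pvAdvHi s k hi with hhi'
    have loAll : ∀ m, m < lo' → 200 < pvD s k m := fun m hm =>
      if h : m < lo then hinvLo m h else l3 m (by omega) hm
    have hiAll : ∀ m, m < hi' → 57 ≤ pvD s k m := fun m hm =>
      if h : m < hi then hinvHi m h else m3 m (by omega) hm
    have window : ∀ j, j < k →
        ((fun j => decide (57 ≤ pvD s k j ∧ pvD s k j ≤ 200)) j = true ↔ (lo' ≤ j ∧ j < hi')) := by
      intro j hj
      rw [decide_eq_true_eq]
      constructor
      · rintro ⟨h57, h200⟩
        constructor
        · by_contra hc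
          exact absurd h200 (not_le.mpr (loAll j (by omega)))
        · by_contra hc
          push Not at hc
          have hmono : s.getD hi' 0 ≤ s.getD j 0 := pv_mono hs hc (by omega)
          have : pvD s k j < 57 := by
            have := m4 (by omega)
            unfold pvD at *
            omega
          omega
      · rintro ⟨h1, h2⟩
        refine ⟨hiAll j h2, ?_⟩
        have hmono : s.getD lo' 0 ≤ s.getD j 0 := pv_mono hs h1 (by omega)
        have hle : pvD s k lo' ≤ 200 := l4 (by omega)
        unfold pvD at *
        omega
    rw [List.range_succ, List.foldl_append, hfold]
    refine ⟨lo', hi', ?_, by omega, by omega, ?_⟩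
    · simp only [List.foldl_cons, List.foldl_nil]
      rw [← hlo', ← hhi']
      rw [PySem.List.foldl_append_singleton_eq_map]
      have e1 : (List.range' lo' (hi' - lo')).map (fun j => s.getD k 0 - s.getD j 0)
          = ((List.range k).filter (fun j => decide (57 ≤ pvD s k j ∧ pvD s k j ≤ 200))).map (pvD s k) := by
        rw [pv_filter_range_eq_range' _ k lo' hi' (by omega) window]
        rfl
      rw [e1]
      have e2 : pvAout s (k+1) = pvAout s k ++ ((List.range k).filter (fun j => decide (57 ≤ pvD s k j ∧ pvD s k j ≤ 200))).map (pvD s k) := by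
        unfold pvAout
        rw [List.range_succ, List.foldl_append, List.foldl_cons, List.foldl_nil]
      rw [e2]
    · intro hk1
      constructor
      · intro m hm
        have h1 : 200 < pvD s k m := loAll m hm
        have h2 : s.getD k 0 ≤ s.getD (k+1) 0 := pv_mono hs (by omega) hk1
        unfold pvD at *
        omega
      · intro m hm
        have h1 : 57 ≤ pvD s k m := hiAll m hm
        have h2 : s.getD k 0 ≤ s.getD (k+1) 0 := pv_mono hs (by omega) hk1
        unfold pvD at *
        omega

lemma pv_A_norm_gen (s : List Int) :
    (PySem.List.pyRange 0 (s.length : Int) 1).foldl (fun convolution i =>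
      (PySem.List.pyRange 0 i 1).foldl (fun convolution j =>
        let mass_diff := PySem.List.pyGetD s i 0 - PySem.List.pyGetD s j 0
        if 57 ≤ mass_diff ∧ mass_diff ≤ 200 then convolution ++ [mass_diff] else convolution)
        convolution) [] = pvAout s s.length := by
  unfold pvAout
  rw [PySem.List.pyRange_zero_nat, List.foldl_map]
  apply PySem.List.foldl_congr_mem
  intro acc i _
  rw [PySem.List.pyRange_zero_nat, List.foldl_map]
  have step : ∀ (c : List Int) (j : Nat),
      (fun (convolution : List Int) (j : Int) =>
        let mass_diff := PySem.List.pyGetD s i 0 - PySem.List.pyGetD s j 0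
        if 57 ≤ mass_diff ∧ mass_diff ≤ 200 then convolution ++ [mass_diff] else convolution) c (j : Int)
      = (fun (c : List Int) (j : Nat) =>
          if (fun j => decide (57 ≤ pvD s i j ∧ pvD s i j ≤ 200)) j = true
          then c ++ [pvD s i j] else c) c j := by
    intro c j
    simp only [PySem.List.pyGetD_natCast, decide_eq_true_eq, pvD]
  rw [PySem.List.foldl_congr_mem _ _ _ _ (fun c j _ => step c j)]
  rw [PySem.List.foldl_append_if]

lemma pv_A_norm (spectrum : List Int) :
    spectral_convolution spectrum = pvAout (PySem.List.sorted spectrum (fun x => x))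
      (PySem.List.sorted spectrum (fun x => x)).length := by
  unfold spectral_convolution
  exact pv_A_norm_gen _

-- ===== VERDICT (by name: the statement is the Claim_ definition above) =====
theorem spectral_convolution_spec : Claim_equal_spectral_convolution := by
  intro spectrum _
  unfold Spec_spectral_convolution
  rw [pv_A_norm]
  set s := PySem.List.sorted spectrum (fun x => x) with hsdef
  have hs : List.Pairwise (fun a b : Int => a ≤ b) s := by
    have := PySem.List.sorted_pairwise spectrum (fun x : Int => x)
    simpa using this
  obtain ⟨lo, hi, hfold, -, -, -⟩ := pv_main s hs s.length (le_refl _)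
  show pvAout s s.length = ((List.range s.length).foldl (fun (st : List Int × Nat × Nat) i =>
      let lo := pvAdvLo s i st.2.1
      let hi := pvAdvHi s i st.2.2
      let convolution := (List.range' lo (hi - lo)).foldl
        (fun c j => c ++ [s.getD i 0 - s.getD j 0]) st.1
      (convolution, lo, hi)) ([], 0, 0)).1
  rw [hfold]
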